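-- pv_equiv track=rewrite | github.com/s1ngle0f/ParseMIREA | process_the_file.py | find_n_upper_symbol
-- ===== SOURCE A (Python) =====
-- def find_n_upper_symbol(string: str, n: int = 0):
--     counter = 0
--     for i, char in enumerate(string):
--         if char.isupper():
--             if n == counter:
--                 return i
--             else:
--                 counter += 1
--     return 0
-- ===== SOURCE B (Python) =====
-- def find_n_upper_symbol(string: str, n: int = 0):
--     uppers = [i for i, c in enumerate(string) if c.isupper()]
--     return uppers[n] if 0 <= n < len(uppers) else 0
-- ===== Notes on version B (the rewrite author's own statement) =====
-- stated objective: simpler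
-- what changed: Replaces the counter-threading early-return loop by building the full table of uppercase indices once and doing a bounds-checked positional lookup.
import Mathlib
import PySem

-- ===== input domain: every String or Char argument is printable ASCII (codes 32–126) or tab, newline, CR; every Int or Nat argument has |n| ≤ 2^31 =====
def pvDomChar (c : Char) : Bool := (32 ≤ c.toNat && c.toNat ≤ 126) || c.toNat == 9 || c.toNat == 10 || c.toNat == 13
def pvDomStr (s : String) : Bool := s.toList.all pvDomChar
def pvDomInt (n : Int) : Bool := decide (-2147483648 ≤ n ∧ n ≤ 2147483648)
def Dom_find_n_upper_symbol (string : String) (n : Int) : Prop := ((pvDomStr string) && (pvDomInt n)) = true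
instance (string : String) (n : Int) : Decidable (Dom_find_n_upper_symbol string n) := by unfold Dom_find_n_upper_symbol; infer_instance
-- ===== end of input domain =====

-- B builds the full table of uppercase indices and does one bounds-checked lookup,
-- instead of A's counter-threading loop with an early return; same O(n) cost, plainer shape.

-- ===== PORT A =====
-- loop over enumerate(string) threading the running counter; early return becomes returning the index
def findA : List (Int × Char) → Int → Int → Int
  | [], _, _ => 0
  | (i, c) :: rest, n, counter =>
    if PySem.Chars.isupper c then
      if n == counter then i else findA rest n (counter + 1)
    else findA rest n counter

def find_n_upper_symbol (string : String) (n : Int) : Int :=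
  findA (PySem.List.enumerate string.toList 0) n 0

-- ===== PORT B =====
def find_n_upper_symbol_alt (string : String) (n : Int) : Int :=
  let uppers := ((PySem.List.enumerate string.toList 0).filter
      (fun p => PySem.Chars.isupper p.2)).map (fun p => p.1)
  if 0 ≤ n ∧ n < (uppers.length : Int) then (PySem.List.pyGet? uppers n).getD 0 else 0

-- ===== PRECONDITION & SPEC =====
def Spec_find_n_upper_symbol (string : String) (n : Int) (out : Int) : Prop := out = find_n_upper_symbol_alt string n
instance (string : String) (n : Int) (out : Int) : Decidable (Spec_find_n_upper_symbol string n out) := by unfold Spec_find_n_upper_symbol; infer_instance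

-- ===== CLAIM (what is proved, stated in full; the proofs are below) =====
def Claim_equal_find_n_upper_symbol : Prop := ∀ (string : String) (n : Int), Dom_find_n_upper_symbol string n → Spec_find_n_upper_symbol string n (find_n_upper_symbol string n)

-- ===== LEMMAS AND PROOFS =====

-- B's lookup written over an arbitrary enumerated tail, for the induction
def lookB (l : List (Int × Char)) (m : Int) : Int :=
  let uppers := (l.filter (fun p => PySem.Chars.isupper p.2)).map (fun p => p.1)
  if 0 ≤ m ∧ m < (uppers.length : Int) then (PySem.List.pyGet? uppers m).getD 0 else 0

lemma pyGet?_cons_shift (x : Int) (xs : List Int) (m : Int) (h : 1 ≤ m) :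
    PySem.List.pyGet? (x :: xs) m = PySem.List.pyGet? xs (m - 1) := by
  rw [PySem.List.pyGet?_of_nonneg (x :: xs) (by omega : (0:Int) ≤ m),
    PySem.List.pyGet?_of_nonneg xs (by omega : (0:Int) ≤ m - 1)]
  rw [show m.toNat = (m - 1).toNat + 1 from by omega]
  simp

lemma findA_eq_lookB (l : List (Int × Char)) (n counter : Int) :
    findA l n counter = lookB l (n - counter) := by
  induction l generalizing counter with
  | nil => simp [findA, lookB]
  | cons p rest ih =>
    obtain ⟨i, c⟩ := p
    by_cases hu : PySem.Chars.isupper c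
    · by_cases he : n = counter
      · subst he
        rw [findA, lookB]
        simp only [hu, if_true, beq_self_eq_true, List.filter_cons, List.map_cons,
          List.length_cons, sub_self]
        rw [if_pos (by constructor <;> omega), PySem.List.pyGet?_zero_cons]
        rfl
      · have hne : (n == counter) = false := by simp [he]
        rw [findA, lookB]
        simp only [hu, if_true, hne, Bool.false_eq_true, if_false]
        rw [ih (counter + 1), lookB]
        simp only [List.filter_cons, hu, if_true, List.map_cons, List.length_cons]
        set xs := (List.filter (fun p => PySem.Chars.isupper p.2) rest).map (fun p => p.1)
          with hxs
        rw [show n - (counter + 1) = n - counter - 1 from by ring]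
        push_cast
        by_cases hin : 0 ≤ n - counter - 1 ∧ n - counter - 1 < (xs.length : Int)
        · rw [if_pos hin, if_pos (by constructor <;> omega),
            pyGet?_cons_shift i xs (n - counter) (by omega)]
        · rw [if_neg hin, if_neg (by intro h; apply hin; constructor <;> omega)]
    · have hu' : PySem.Chars.isupper c = false := by simpa using hu
      rw [findA, lookB]
      simp only [hu', Bool.false_eq_true, if_false]
      rw [ih counter, lookB]
      simp [hu']

-- ===== VERDICT (by name: the statement is the Claim_ definition above) =====
theorem find_n_upper_symbol_spec : Claim_equal_find_n_upper_symbol := by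
  intro s n _
  show _ = _
  rw [find_n_upper_symbol, findA_eq_lookB]
  simp [lookB, find_n_upper_symbol_alt]
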